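-- pv_equiv track=rewrite | github.com/comeinzo/3AvisionBackend | bar_chart.py | prefer_masked_columns
-- ===== SOURCE A (Python) =====
-- def prefer_masked_columns(columns_metadata):
--     """
--     If <col>_masked exists, hide <col> and use masked version instead
--     """
--     seen = {}
--     final_columns = []
--
--     for column_name, data_type in columns_metadata:
--         if column_name.endswith('_masked'):
--             base_col = column_name.replace('_masked', '')
--             seen[base_col] = (column_name, data_type)
--         else:
--             if column_name not in seen:
--                 seen[column_name] = (column_name, data_type)
--
--     return list(seen.values())
-- ===== SOURCE B (Python) =====
-- def prefer_masked_columns(columns_metadata):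
--     """
--     If <col>_masked exists, hide <col> and use masked version instead.
--     Alternative decomposition: dedup by key in first-occurrence order, and
--     pick each key's value by a direct scan for the last masked occurrence.
--     """
--     cols = list(columns_metadata)
--     out = []
--     done = set()
--     for name, dtype in cols:
--         key = name.replace('_masked', '') if name.endswith('_masked') else name
--         if key in done:
--             continue
--         done.add(key)
--         chosen = (name, dtype)
--         for name2, dtype2 in cols:
--             if name2.endswith('_masked') and name2.replace('_masked', '') == key:
--                 chosen = (name2, dtype2)
--         out.append(chosen)
--     return out
-- ===== Notes on version B (the rewrite author's own statement) =====
-- stated objective: alternative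
-- what changed: Replaces A's single-pass overwrite-in-place dict with a dict-free decomposition: dedup keys in first-occurrence order and, for each new key, a direct rescan of the whole list for its last masked occurrence (falling back to the current plain pair).
import Mathlib
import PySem

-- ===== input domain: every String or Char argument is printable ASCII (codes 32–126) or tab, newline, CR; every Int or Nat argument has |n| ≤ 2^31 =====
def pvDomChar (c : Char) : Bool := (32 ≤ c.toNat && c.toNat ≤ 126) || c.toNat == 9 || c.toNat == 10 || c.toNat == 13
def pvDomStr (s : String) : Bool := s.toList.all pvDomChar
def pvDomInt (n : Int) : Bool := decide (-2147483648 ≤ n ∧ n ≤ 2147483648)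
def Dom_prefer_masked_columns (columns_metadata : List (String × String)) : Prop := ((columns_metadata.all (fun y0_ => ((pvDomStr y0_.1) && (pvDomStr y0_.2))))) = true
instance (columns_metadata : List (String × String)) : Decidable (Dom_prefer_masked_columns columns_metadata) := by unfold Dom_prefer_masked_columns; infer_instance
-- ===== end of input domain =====

-- B replaces A's overwrite-in-place dict with a dedup-by-key pass plus a direct scan
-- for each key's last masked occurrence (objective: alternative decomposition, no dict).

-- ===== PORT A =====
-- loop body of A's single pass (seen[base] = masked pair; plain pair only if unseen)
def pmcStepA (seen : PySem.Dict String (String × String)) (p : String × String) :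
    PySem.Dict String (String × String) :=
  if PySem.Str.endswith p.1 "_masked" then
    seen.insert (PySem.Str.replace p.1 "_masked" "") p
  else
    if seen.contains p.1 then seen else seen.insert p.1 p

def prefer_masked_columns (columns_metadata : List (String × String)) : List (String × String) :=
  (columns_metadata.foldl pmcStepA PySem.Dict.empty).values

-- ===== PORT B =====
-- key = name.replace('_masked','') if name.endswith('_masked') else name
def pmcKey (name : String) : String :=
  if PySem.Str.endswith name "_masked" then PySem.Str.replace name "_masked" "" else name

-- inner scan of B: last masked occurrence whose base is k, else the default pair
def pmcChoose (cols : List (String × String)) (k : String) (dflt : String × String) :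
    String × String :=
  cols.foldl
    (fun ch q =>
      if PySem.Str.endswith q.1 "_masked" && (PySem.Str.replace q.1 "_masked" "" == k) then q
      else ch)
    dflt

-- outer loop of B: skip keys already done, else emit the chosen pair
def pmcGo (all : List (String × String)) :
    List (String × String) → PySem.Set String → List (String × String)
  | [], _ => []
  | p :: t, done =>
    let k := pmcKey p.1
    if PySem.Set.contains done k then pmcGo all t done
    else pmcChoose all k p :: pmcGo all t (PySem.Set.add done k)

def prefer_masked_columns_alt (columns_metadata : List (String × String)) :
    List (String × String) :=
  pmcGo columns_metadata columns_metadata PySem.Set.empty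

-- ===== PRECONDITION & SPEC =====
def Spec_prefer_masked_columns (columns_metadata : List (String × String)) (out : List (String × String)) : Prop := out = prefer_masked_columns_alt columns_metadata
instance (columns_metadata : List (String × String)) (out : List (String × String)) : Decidable (Spec_prefer_masked_columns columns_metadata out) := by unfold Spec_prefer_masked_columns; infer_instance

-- ===== CLAIM (what is proved, stated in full; the proofs are below) =====
def Claim_equal_prefer_masked_columns : Prop := ∀ (columns_metadata : List (String × String)), Dom_prefer_masked_columns columns_metadata → Spec_prefer_masked_columns columns_metadata (prefer_masked_columns columns_metadata)

-- ===== LEMMAS AND PROOFS =====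

-- the match condition of B's inner scan
def pmcCond (q : String × String) (k : String) : Bool :=
  PySem.Str.endswith q.1 "_masked" && (PySem.Str.replace q.1 "_masked" "" == k)

-- last matching occurrence, as an Option (proof-only view of pmcChoose)
def pmcLm (cols : List (String × String)) (k : String) : Option (String × String) :=
  cols.foldl (fun acc q => if pmcCond q k then some q else acc) none

lemma pmcSet_contains_add (s : PySem.Set String) (x k : String) :
    PySem.Set.contains (PySem.Set.add s x) k = (k == x || PySem.Set.contains s k) := by
  simp only [PySem.Set.contains, PySem.Set.add, List.contains_eq_mem]
  split
  · rename_i h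
    by_cases hk : k = x <;> simp [hk, h]
  · simp [List.mem_append, Bool.beq_eq_decide_eq, Bool.or_comm]

lemma pmcLm_shift (t : List (String × String)) (k : String) (acc : Option (String × String)) :
    t.foldl (fun acc q => if pmcCond q k then some q else acc) acc = (pmcLm t k).or acc := by
  induction t generalizing acc with
  | nil => simp [pmcLm]
  | cons a t ih =>
    simp only [List.foldl_cons, pmcLm] at *
    rw [ih, ih (acc := if pmcCond a k then some a else none)]
    cases h : pmcLm t k <;> simp [pmcLm] at h <;> rw [h] <;> cases hc : pmcCond a k <;> simp

lemma pmcLm_cons (a : String × String) (t : List (String × String)) (k : String) :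
    pmcLm (a :: t) k = (pmcLm t k).or (if pmcCond a k then some a else none) := by
  simp only [pmcLm, List.foldl_cons]
  exact pmcLm_shift t k _

lemma pmcChoose_cons (a : String × String) (t : List (String × String)) (k : String)
    (d : String × String) :
    pmcChoose (a :: t) k d = pmcChoose t k (if pmcCond a k then a else d) := rfl

lemma pmcChoose_eq_lm (cols : List (String × String)) (k : String) (dflt : String × String) :
    pmcChoose cols k dflt = (pmcLm cols k).getD dflt := by
  induction cols generalizing dflt with
  | nil => simp [pmcChoose, pmcLm]
  | cons a t ih =>
    rw [pmcChoose_cons, ih, pmcLm_cons]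
    cases h : pmcLm t k with
    | none =>
      cases hc : pmcCond a k with
      | false => simp
      | true => simp
    | some p => simp

lemma pmcChoose_congr {cols : List (String × String)} {k : String}
    (h : ∃ q ∈ cols, pmcCond q k = true) (v w : String × String) :
    pmcChoose cols k v = pmcChoose cols k w := by
  rw [pmcChoose_eq_lm, pmcChoose_eq_lm]
  obtain ⟨q, hq, hcq⟩ := h
  have hsome : (pmcLm cols k).isSome := by
    induction cols with
    | nil => simp at hq
    | cons a t ih =>
      rw [pmcLm_cons]
      rcases List.mem_cons.mp hq with h1 | h1
      · cases hl : pmcLm t k <;> simp [h1 ▸ hcq]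
      · cases hl : pmcLm t k <;> simp_all
  cases hl : pmcLm cols k
  · rw [hl] at hsome; simp at hsome
  · simp

lemma pmcCond_true_iff (q : String × String) (k : String) :
    pmcCond q k = true ↔
      PySem.Str.endswith q.1 "_masked" = true ∧ PySem.Str.replace q.1 "_masked" "" = k := by
  simp [pmcCond]

lemma pmcStepA_masked (seen : PySem.Dict String (String × String)) (p : String × String)
    (he : PySem.Str.endswith p.1 "_masked" = true) :
    pmcStepA seen p = seen.insert (PySem.Str.replace p.1 "_masked" "") p := by
  simp only [pmcStepA, he, if_true]

lemma pmcStepA_plain_seen (seen : PySem.Dict String (String × String)) (p : String × String)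
    (he : PySem.Str.endswith p.1 "_masked" = false) (hc : seen.contains p.1 = true) :
    pmcStepA seen p = seen := by
  simp only [pmcStepA, he, hc, Bool.false_eq_true, if_false, if_true]

lemma pmcStepA_plain_new (seen : PySem.Dict String (String × String)) (p : String × String)
    (he : PySem.Str.endswith p.1 "_masked" = false) (hc : seen.contains p.1 = false) :
    pmcStepA seen p = seen.insert p.1 p := by
  simp only [pmcStepA, he, hc, Bool.false_eq_true, if_false]

lemma pmcGo_skip (all : List (String × String)) (p : String × String)
    (t : List (String × String)) (done : PySem.Set String)
    (hd : PySem.Set.contains done (pmcKey p.1) = true) :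
    pmcGo all (p :: t) done = pmcGo all t done := by
  simp only [pmcGo, hd, if_true]

lemma pmcGo_emit (all : List (String × String)) (p : String × String)
    (t : List (String × String)) (done : PySem.Set String)
    (hd : PySem.Set.contains done (pmcKey p.1) = false) :
    pmcGo all (p :: t) done
      = pmcChoose all (pmcKey p.1) p :: pmcGo all t (PySem.Set.add done (pmcKey p.1)) := by
  simp only [pmcGo, hd, Bool.false_eq_true, if_false]

-- if the suffix has no masked occurrence for k, A's fold preserves the value at k
lemma pmcPres (t : List (String × String)) (s : PySem.Dict String (String × String))
    (k : String) (v : String × String) (hn : pmcLm t k = none) (hv : s.get? k = some v) :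
    (t.foldl pmcStepA s).get? k = some v := by
  induction t generalizing s with
  | nil => simpa using hv
  | cons b t ih =>
    rw [pmcLm_cons] at hn
    obtain ⟨hn', hcb⟩ := Option.or_eq_none_iff.mp hn
    have hcb' : pmcCond b k = false := by
      cases hc : pmcCond b k
      · rfl
      · rw [hc] at hcb; simp at hcb
    rw [List.foldl_cons]
    apply ih _ hn'
    cases he : PySem.Str.endswith b.1 "_masked" with
    | true =>
      have hne : k ≠ PySem.Str.replace b.1 "_masked" "" := by
        intro hk
        have : pmcCond b k = true := (pmcCond_true_iff b k).mpr ⟨he, hk.symm⟩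
        rw [this] at hcb'; exact absurd hcb' (by simp)
      rw [pmcStepA_masked _ _ he, PySem.Dict.get?_insert_of_ne _ _ hne]
      exact hv
    | false =>
      by_cases hc : s.contains b.1 = true
      · rw [pmcStepA_plain_seen _ _ he hc]; exact hv
      · have hc' : s.contains b.1 = false := by simpa using hc
        have hbk : k ≠ b.1 := by
          intro hk
          rw [hk] at hv
          rw [PySem.Dict.contains_eq_isSome_get?, hv] at hc'
          simp at hc'
        rw [pmcStepA_plain_new _ _ he hc', PySem.Dict.get?_insert_of_ne _ _ hbk]
        exact hv

-- A's final value at a key with a masked occurrence is the last such occurrence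
lemma pmcFin (cols : List (String × String)) (seen : PySem.Dict String (String × String))
    (k : String) (p : String × String) (h : pmcLm cols k = some p) :
    (cols.foldl pmcStepA seen).get? k = some p := by
  induction cols generalizing seen with
  | nil => simp [pmcLm] at h
  | cons a t ih =>
    rw [pmcLm_cons] at h
    rw [List.foldl_cons]
    cases hl : pmcLm t k with
    | some p' =>
      rw [hl] at h
      have hp : p' = p := by simpa using h
      exact ih _ (hp ▸ hl)
    | none =>
      rw [hl] at h
      cases hc : pmcCond a k with
      | false => rw [hc] at h; simp at h
      | true =>
      rw [hc] at h
      have ha : a = p := by simpa using h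
      obtain ⟨he, hr⟩ := (pmcCond_true_iff a k).mp hc
      rw [pmcStepA_masked _ _ he, hr, ha]
      exact pmcPres t _ k p hl (PySem.Dict.get?_insert_self _ _ _)

lemma pmcNodup (cols : List (String × String)) (seen : PySem.Dict String (String × String))
    (h : seen.keys.Nodup) : (cols.foldl pmcStepA seen).keys.Nodup := by
  induction cols generalizing seen with
  | nil => simpa
  | cons a t ih =>
    rw [List.foldl_cons]
    apply ih
    unfold pmcStepA
    split
    · exact PySem.Dict.nodup_keys_insert _ _ _ h
    · split
      · exact h
      · exact PySem.Dict.nodup_keys_insert _ _ _ h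

-- main invariant: patched items of A's fold = patched items of the start state ++ B's output
lemma pmcMain (all : List (String × String)) (cols : List (String × String))
    (seen : PySem.Dict String (String × String)) (done : PySem.Set String)
    (hsub : ∀ p ∈ cols, p ∈ all)
    (hinv : ∀ k, PySem.Set.contains done k = seen.contains k) :
    (cols.foldl pmcStepA seen).items.map (fun q => pmcChoose all q.1 q.2)
      = seen.items.map (fun q => pmcChoose all q.1 q.2) ++ pmcGo all cols done := by
  induction cols generalizing seen done with
  | nil => simp only [List.foldl_nil, pmcGo, List.append_nil]
  | cons p t ih =>
    have hpall : p ∈ all := hsub p List.mem_cons_self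
    have hsub' : ∀ q ∈ t, q ∈ all := fun q hq => hsub q (List.mem_cons_of_mem _ hq)
    rw [List.foldl_cons]
    cases he : PySem.Str.endswith p.1 "_masked" with
    | true =>
      have hkey : pmcKey p.1 = PySem.Str.replace p.1 "_masked" "" := by
        simp only [pmcKey, he, if_true]
      set k := PySem.Str.replace p.1 "_masked" "" with hk
      have hcondp : pmcCond p k = true := (pmcCond_true_iff p k).mpr ⟨he, rfl⟩
      rw [pmcStepA_masked _ _ he, ← hk]
      by_cases hc : seen.contains k = true
      · -- overwrite in place; B skips this occurrence
        rw [pmcGo_skip all p t done (by rw [hkey, hinv k]; exact hc),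
          ih _ done hsub' (fun k' => by
            rw [hinv k', PySem.Dict.contains_insert]
            by_cases hk' : k' = k <;> simp [hk', hc])]
        congr 1
        rw [PySem.Dict.items_insert_of_contains _ _ hc, List.map_map]
        apply List.map_congr_left
        intro q hq
        by_cases hqk : q.1 = k
        · simp only [Function.comp, hqk, BEq.rfl, if_true]
          exact pmcChoose_congr ⟨p, hpall, hcondp⟩ _ _
        · simp [Function.comp, hqk]
      · -- fresh key; B emits the chosen pair here
        have hc' : seen.contains k = false := by simpa using hc
        rw [pmcGo_emit all p t done (by rw [hkey, hinv k]; exact hc'), hkey,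
          ih _ (PySem.Set.add done k) hsub' (fun k' => by
            rw [pmcSet_contains_add, hinv k', PySem.Dict.contains_insert]),
          PySem.Dict.items_insert_of_not_contains _ _ hc']
        simp
    | false =>
      have hkey : pmcKey p.1 = p.1 := by
        simp only [pmcKey, he, Bool.false_eq_true, if_false]
      by_cases hc : seen.contains p.1 = true
      · rw [pmcStepA_plain_seen _ _ he hc,
          pmcGo_skip all p t done (by rw [hkey, hinv p.1]; exact hc),
          ih _ done hsub' hinv]
      · have hc' : seen.contains p.1 = false := by simpa using hc
        rw [pmcStepA_plain_new _ _ he hc',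
          pmcGo_emit all p t done (by rw [hkey, hinv p.1]; exact hc'), hkey,
          ih _ (PySem.Set.add done p.1) hsub' (fun k' => by
            rw [pmcSet_contains_add, hinv k', PySem.Dict.contains_insert]),
          PySem.Dict.items_insert_of_not_contains _ _ hc']
        simp

-- ===== VERDICT (by name: the statement is the Claim_ definition above) =====
theorem prefer_masked_columns_spec : Claim_equal_prefer_masked_columns := by
  intro cm _
  unfold Spec_prefer_masked_columns prefer_masked_columns prefer_masked_columns_alt
  have hmain := pmcMain cm cm PySem.Dict.empty PySem.Set.empty (fun _ h => h)
    (fun k => by simp [PySem.Set.empty, PySem.Set.contains, PySem.Dict.contains_empty])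
  set F := cm.foldl pmcStepA PySem.Dict.empty with hF
  have hnd : F.keys.Nodup := pmcNodup cm _ PySem.Dict.nodup_keys_empty
  have hvals : F.values = F.items.map (fun q => pmcChoose cm q.1 q.2) := by
    rw [PySem.Dict.values]
    apply List.map_congr_left
    intro q hq
    cases hl : pmcLm cm q.1 with
    | none => rw [pmcChoose_eq_lm, hl]; rfl
    | some p =>
      have h1 : F.get? q.1 = some p := pmcFin cm _ q.1 p hl
      have h2 : F.get? q.1 = some q.2 :=
        PySem.Dict.get?_of_mem_items F (by simpa using hq) hnd
      have hpq : p = q.2 := by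
        rw [h1] at h2
        exact Option.some_inj.mp h2
      rw [pmcChoose_eq_lm, hl, Option.getD_some]
      exact hpq.symm
  rw [hvals, hmain]
  have hemp : (PySem.Dict.empty : PySem.Dict String (String × String)).items = [] := rfl
  rw [hemp]
  simp
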